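-- pv_equiv track=rewrite | github.com/ShreyBodra/Python_Code | 181310132006-water_jug_problem.py | eq
-- ===== SOURCE A (Python) =====
-- def eq(j1, j2, c):
--     list1 = []
--     min1 = []
--     # To find all possible set (x,y) in range (-3,3)
--     for x in range(-3, 4):
--         for y in range(-3, 4):
--             if j1 * x + j2 * y == c:
--                 list1.append((x, y))    #list1 = [(-1,2), (2,-2)]
--
--     #find sum of absolute values of individual sets
--     for i in range(len(list1)):
--         min1.append(abs(list1[i][0]) + abs(list1[i][1]))     #min1 = [3 ,4]
--
--
--     temp = min1.index(min(min1))
--     if list1[temp][0] > list1[temp][1]: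
--         return 0
--     return 1
-- ===== SOURCE B (Python) =====
-- def eq(j1, j2, c):
--     # Best-first search by cost level: visit candidate pairs in increasing
--     # |x|+|y| (and, within a level, in increasing (x, y)), returning at the
--     # first pair solving j1*x + j2*y == c.  No solution in [-3,3]^2 raises
--     # ValueError, as a search that found nothing naturally reports.
--     for s in range(0, 7):
--         for x in range(-3, 4):
--             if abs(x) > s:
--                 continue
--             r = s - abs(x)
--             for y in ([-r, r] if r > 0 else [0]):
--                 if -3 <= y <= 3 and j1 * x + j2 * y == c:
--                     return 0 if x > y else 1
--     raise ValueError("no solution in range")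
-- ===== Notes on version B (the rewrite author's own statement) =====
-- stated objective: alternative
-- what changed: B replaces A's pipeline (collect all 49-grid solutions, build a parallel list of |x|+|y| sums, then min/index bookkeeping to look the winner back up) by a best-first search that visits candidate pairs level by level in increasing |x|+|y| (increasing (x,y) within a level) and returns at the first solving pair, so no candidate list or minimum is ever built.
import Mathlib
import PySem

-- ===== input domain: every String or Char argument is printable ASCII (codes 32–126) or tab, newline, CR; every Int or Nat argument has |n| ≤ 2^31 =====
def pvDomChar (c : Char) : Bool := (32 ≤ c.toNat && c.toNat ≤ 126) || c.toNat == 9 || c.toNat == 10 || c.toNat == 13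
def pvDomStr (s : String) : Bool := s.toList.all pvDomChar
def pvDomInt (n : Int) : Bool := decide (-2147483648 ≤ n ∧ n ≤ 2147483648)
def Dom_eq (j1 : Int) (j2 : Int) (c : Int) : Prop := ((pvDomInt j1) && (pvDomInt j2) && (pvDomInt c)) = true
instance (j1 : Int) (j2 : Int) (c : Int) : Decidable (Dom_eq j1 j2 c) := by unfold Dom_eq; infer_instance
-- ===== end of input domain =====

-- B replaces A's collect-all / parallel-sums / min / index-lookup pipeline by a best-first
-- search: it visits candidate pairs level by level in increasing |x|+|y| (increasing (x,y)
-- within a level) and returns at the first pair solving the equation, so no candidate list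
-- and no minimum are ever built. Both Pythons raise ValueError when no pair in [-3,3]^2
-- solves the equation; Pre_eq excludes exactly those inputs.

-- ===== PORT A =====
def eq (j1 : Int) (j2 : Int) (c : Int) : Int :=
  let list1 : List (Int × Int) :=
    (PySem.List.pyRange (-3) 4 1).foldl (fun acc x =>
      (PySem.List.pyRange (-3) 4 1).foldl (fun acc2 y =>
        if j1 * x + j2 * y == c then acc2 ++ [(x, y)] else acc2) acc) []
  let min1 : List Int :=
    (PySem.List.pyRange 0 (list1.length : Int) 1).foldl (fun acc i =>
      acc ++ [|(PySem.List.pyGetD list1 i (0, 0)).1| + |(PySem.List.pyGetD list1 i (0, 0)).2|]) []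
  match PySem.List.min? min1 (fun v => v) with   -- min(min1): none = ValueError, outside Pre_eq
  | none => 0
  | some m =>
    match PySem.List.index? min1 m with
    | none => 0
    | some temp =>
      match PySem.List.pyGet? list1 (temp : Int) with
      | none => 0
      | some p => if p.1 > p.2 then 0 else 1

-- ===== PORT B =====
-- early 'return' inside the triple loop = findSome?; 'continue' on |x| > s = none
def eq_alt (j1 : Int) (j2 : Int) (c : Int) : Int :=
  match (PySem.List.pyRange 0 7 1).findSome? (fun s =>
    (PySem.List.pyRange (-3) 4 1).findSome? (fun x =>
      if |x| > s then none
      else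
        let r := s - |x|
        (if r > 0 then [-r, r] else [(0 : Int)]).findSome? (fun y =>
          if -3 ≤ y ∧ y ≤ 3 ∧ j1 * x + j2 * y == c then
            some (if x > y then (0 : Int) else 1)
          else none))) with
  | some v => v
  | none => 0   -- Python raises ValueError here; outside Pre_eq

-- ===== PRECONDITION & SPEC =====
-- Pre_eq excludes exactly the inputs on which no (x,y) in [-3,3]² solves j1*x+j2*y=c:
-- there Python A raises ValueError (min of an empty list), and Python B raises ValueError too.
def Pre_eq (j1 : Int) (j2 : Int) (c : Int) : Prop :=
  ∃ x ∈ PySem.List.pyRange (-3) 4 1, ∃ y ∈ PySem.List.pyRange (-3) 4 1, j1 * x + j2 * y = c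
instance (j1 : Int) (j2 : Int) (c : Int) : Decidable (Pre_eq j1 j2 c) := by unfold Pre_eq; infer_instance

def pvWitness_eq : Int × Int × Int := (1, 1, 2)

def Spec_eq (j1 : Int) (j2 : Int) (c : Int) (out : Int) : Prop := out = eq_alt j1 j2 c
instance (j1 : Int) (j2 : Int) (c : Int) (out : Int) : Decidable (Spec_eq j1 j2 c out) := by unfold Spec_eq; infer_instance

-- ===== CLAIM (what is proved, stated in full; the proofs are below) =====
def Claim_equal_eq : Prop := ∀ (j1 : Int) (j2 : Int) (c : Int), Dom_eq j1 j2 c → Pre_eq j1 j2 c → Spec_eq j1 j2 c (eq j1 j2 c)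

-- ===== LEMMAS AND PROOFS =====

-- sum of absolute values, the common key
def sAbs (p : Int × Int) : Int := |p.1| + |p.2|
-- strict lexicographic order on pairs (the scan order of A's nested loops)
abbrev pairLt (p q : Int × Int) : Prop := p.1 < q.1 ∨ (p.1 = q.1 ∧ p.2 < q.2)
-- strict order by (|x|+|y|, x, y): the order B's best-first search visits pairs in
abbrev keyLt (p q : Int × Int) : Prop :=
  sAbs p < sAbs q ∨ (sAbs p = sAbs q ∧ pairLt p q)
-- the value both programs return for a chosen pair
def ans (p : Int × Int) : Int := if p.1 > p.2 then 0 else 1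
-- the solution test
def sol (j1 j2 c : Int) (pr : Int × Int) : Bool := j1 * pr.1 + j2 * pr.2 == c

-- A's scan grid, in A's order
def gridA : List (Int × Int) :=
  (PySem.List.pyRange (-3) 4 1).flatMap (fun x =>
    (PySem.List.pyRange (-3) 4 1).map (fun y => ((x : Int), (y : Int))))
-- B's visiting order, flattened
def gridB : List (Int × Int) :=
  (PySem.List.pyRange 0 7 1).flatMap (fun s =>
    (PySem.List.pyRange (-3) 4 1).flatMap (fun x =>
      if |x| > s then []
      else ((if s - |x| > 0 then [-(s - |x|), s - |x|] else [(0 : Int)]).filter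
              (fun y => decide (-3 ≤ y) && decide (y ≤ 3))).map (fun y => (x, y))))

-- first element of minimal sAbs (what A's min/index bookkeeping picks)
def fm : List (Int × Int) → Option (Int × Int)
  | [] => none
  | p :: L => match fm L with
    | none => some p
    | some q => if sAbs q < sAbs p then some q else some p

theorem fm_cons (p : Int × Int) (L : List (Int × Int)) :
    fm (p :: L) = match fm L with
      | none => some p
      | some q => if sAbs q < sAbs p then some q else some p := rfl

theorem fm_eq_none_iff (L : List (Int × Int)) : fm L = none ↔ L = [] := by
  cases L with
  | nil => simp [fm]
  | cons p L =>
    rw [fm_cons]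
    cases h : fm L
    · simp
    · simp only [List.cons_ne_nil, iff_false]
      split <;> simp

theorem foldl_min_fm (L : List (Int × Int)) (a : Int) :
    (L.map sAbs).foldl min a = match fm L with | none => a | some q => min (sAbs q) a := by
  induction L generalizing a with
  | nil => rfl
  | cons p L ih =>
    rw [List.map_cons, List.foldl_cons, ih, fm_cons]
    cases h : fm L with
    | none => simp only [min_def]; split_ifs <;> omega
    | some q =>
      by_cases hqp : sAbs q < sAbs p
      · simp only [if_pos hqp, min_def]
        split_ifs <;> omega
      · simp only [if_neg hqp, min_def]
        split_ifs <;> omega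

theorem min?_map_fm (L : List (Int × Int)) :
    PySem.List.min? (L.map sAbs) (fun v => v) = (fm L).map sAbs := by
  cases L with
  | nil => simp [PySem.List.min?_eq_none_iff, fm]
  | cons p L =>
    rw [List.map_cons, PySem.List.min?_id_cons, foldl_min_fm L (sAbs p), fm_cons]
    cases h : fm L with
    | none => simp
    | some q =>
      by_cases hqp : sAbs q < sAbs p
      · simp only [if_pos hqp, Option.map_some, Option.some.injEq, min_def]
        split_ifs <;> omega
      · simp only [if_neg hqp, Option.map_some, Option.some.injEq, min_def]
        split_ifs <;> omega

theorem index_fm (L : List (Int × Int)) (q : Int × Int) (h : fm L = some q) :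
    ∃ k : Nat, PySem.List.index? (L.map sAbs) (sAbs q) = some k ∧ L[k]? = some q := by
  induction L with
  | nil => simp [fm] at h
  | cons p L ih =>
    rw [fm_cons] at h
    cases hL : fm L with
    | none =>
      rw [hL] at h
      cases h
      exact ⟨0, by rw [List.map_cons, PySem.List.index?_cons_self], rfl⟩
    | some q' =>
      rw [hL] at h
      replace h : (if sAbs q' < sAbs p then some q' else some p) = some q := h
      by_cases hs : sAbs q' < sAbs p
      · rw [if_pos hs] at h
        cases h
        obtain ⟨k, hk, hget⟩ := ih hL
        refine ⟨k + 1, ?_, by simpa using hget⟩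
        rw [List.map_cons, PySem.List.index?_cons_of_ne (List.map sAbs L) (show sAbs p ≠ sAbs q by omega), hk]
        rfl
      · rw [if_neg hs] at h
        cases h
        exact ⟨0, by rw [List.map_cons, PySem.List.index?_cons_self], rfl⟩

-- fm on a lex-ordered list is the keyLt-minimum
theorem fm_min : ∀ (L : List (Int × Int)), L.Pairwise pairLt → ∀ (m : Int × Int),
    fm L = some m → m ∈ L ∧ ∀ r ∈ L, r = m ∨ keyLt m r := by
  intro L
  induction L with
  | nil => intro _ m h; simp [fm] at h
  | cons p L ih =>
    intro hpw m h
    obtain ⟨hp, hLpw⟩ := List.pairwise_cons.mp hpw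
    rw [fm_cons] at h
    cases hL : fm L with
    | none =>
      rw [hL] at h; cases h
      have hnil : L = [] := (fm_eq_none_iff L).mp hL
      subst hnil
      exact ⟨by simp, by intro r hr; simp at hr; left; simp [hr]⟩
    | some q =>
      rw [hL] at h
      obtain ⟨hqmem, hqmin⟩ := ih hLpw q hL
      replace h : (if sAbs q < sAbs p then some q else some p) = some m := h
      by_cases hs : sAbs q < sAbs p
      · rw [if_pos hs] at h; cases h
        refine ⟨by simp [hqmem], ?_⟩
        intro r hr
        rcases List.mem_cons.mp hr with rfl | hr
        · right; left; exact hs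
        · exact hqmin r hr
      · rw [if_neg hs] at h; cases h
        refine ⟨by simp, ?_⟩
        intro r hr
        rcases List.mem_cons.mp hr with rfl | hr
        · left; rfl
        · right
          have hpr : pairLt p r := hp r hr
          rcases hqmin r hr with rfl | hqr
          · rcases lt_or_eq_of_le (not_lt.mp hs) with h1 | h1
            · exact Or.inl h1
            · exact Or.inr ⟨h1, hpr⟩
          · rcases hqr with h1 | ⟨h1, _⟩
            · exact Or.inl (by omega)
            · rcases lt_or_eq_of_le (not_lt.mp hs) with h3 | h3
              · exact Or.inl (by omega)
              · exact Or.inr ⟨by omega, hpr⟩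

theorem keyLt_asymm (a b : Int × Int) (h1 : keyLt a b) (h2 : keyLt b a) : False := by
  obtain ⟨a1, a2⟩ := a; obtain ⟨b1, b2⟩ := b
  simp only [keyLt, pairLt] at h1 h2
  generalize hsa : sAbs (a1, a2) = u at h1 h2
  generalize hsb : sAbs (b1, b2) = v at h1 h2
  omega

-- early return in a loop = head of the filtered list
theorem findSome?_if_filter_head {α β : Type} (L : List α) (q : α → Bool) (f : α → β) :
    L.findSome? (fun a => if q a then some (f a) else none)
      = (L.filter q).head?.map f := by
  induction L with
  | nil => rfl
  | cons p L ih =>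
    by_cases h : q p = true
    · simp [List.findSome?_cons, List.filter_cons, h]
    · simp only [List.findSome?_cons, List.filter_cons, h, if_neg]
      simpa [h] using ih

theorem findSome?_flatMap' {α β γ : Type} (L : List α) (f : α → List β) (g : β → Option γ) :
    (L.flatMap f).findSome? g = L.findSome? (fun a => (f a).findSome? g) := by
  induction L with
  | nil => rfl
  | cons p L ih =>
    simp only [List.flatMap_cons, List.findSome?_append, List.findSome?_cons, ih]
    cases List.findSome? g (f p) <;> simp [Option.or]

theorem findSome?_filter' {α β : Type} (L : List α) (p : α → Bool) (g : α → Option β) :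
    (L.filter p).findSome? g = L.findSome? (fun a => if p a then g a else none) := by
  induction L with
  | nil => rfl
  | cons x L ih =>
    by_cases h : p x = true
    · simp [List.filter_cons, h, List.findSome?_cons, ih]
    · simp only [List.filter_cons, h, if_neg, Bool.false_eq_true, not_false_iff, ite_false,
        List.findSome?_cons]
      simpa [h] using ih

theorem findSome?_map' {α β γ : Type} (L : List α) (f : α → β) (g : β → Option γ) :
    (L.map f).findSome? g = L.findSome? (fun a => g (f a)) := by
  induction L with
  | nil => rfl
  | cons x L ih => simp [List.map_cons, List.findSome?_cons, ih]

-- B's nested loops are the scan of gridB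
theorem eq_alt_grid (j1 j2 c : Int) :
    eq_alt j1 j2 c
      = match (gridB.filter (sol j1 j2 c)).head?.map ans with
        | some v => v
        | none => 0 := by
  rw [eq_alt, ← findSome?_if_filter_head gridB (sol j1 j2 c) ans, gridB,
    findSome?_flatMap']
  congr 2
  funext s
  rw [findSome?_flatMap']
  congr 1
  funext x
  by_cases hb : |x| > s
  · simp [hb]
  · simp only [hb, if_neg, not_false_iff, ite_false]
    rw [findSome?_map', findSome?_filter']
    congr 1
    funext y
    by_cases h1 : -3 ≤ y
    · by_cases h2 : y ≤ 3
      · simp [sol, ans, h1, h2]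
      · simp [sol, h1, h2]
    · simp [sol, h1]

-- A computes ans of the first minimal-sum solution of gridA
theorem eq_fm (j1 j2 c : Int) :
    eq j1 j2 c
      = match fm (gridA.filter (sol j1 j2 c)) with
        | none => 0
        | some m => ans m := by
  have hlist1 :
      (PySem.List.pyRange (-3) 4 1).foldl (fun acc x =>
        (PySem.List.pyRange (-3) 4 1).foldl (fun acc2 y =>
          if j1 * x + j2 * y == c then acc2 ++ [((x : Int), (y : Int))] else acc2) acc) []
      = gridA.filter (sol j1 j2 c) := by
    rw [gridA]
    simp only [PySem.List.foldl_append_if, PySem.List.foldl_append_eq_flatMap,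
      List.nil_append, List.filter_flatMap]
    simp [List.filter_map, Function.comp_def, sol]
  have hmin1 : ∀ L : List (Int × Int),
      (PySem.List.pyRange 0 (L.length : Int) 1).foldl (fun acc i =>
        acc ++ [|(PySem.List.pyGetD L i (0, 0)).1| + |(PySem.List.pyGetD L i (0, 0)).2|]) []
      = L.map sAbs := by
    intro L
    rw [PySem.List.foldl_pyRange_zero_pyGetD' L ((0 : Int), (0 : Int))
      (fun acc v => acc ++ [|v.1| + |v.2|]) []]
    simpa [sAbs] using PySem.List.foldl_append_singleton_eq_map
      (fun v : Int × Int => |v.1| + |v.2|) L ([] : List Int)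
  rw [eq]
  simp only [hlist1, hmin1, min?_map_fm]
  cases hfm : fm (gridA.filter (sol j1 j2 c)) with
  | none => rfl
  | some m =>
    obtain ⟨k, hk, hget⟩ := index_fm _ m hfm
    simp only [Option.map_some, hk, PySem.List.pyGet?_natCast, hget, ans]

theorem gridA_pairwise : gridA.Pairwise pairLt := by decide
theorem gridB_pairwise : gridB.Pairwise keyLt := by decide
theorem gridB_perm : gridB.Perm gridA := by decide

theorem eq_eq_alt (j1 j2 c : Int) (hpre : Pre_eq j1 j2 c) : eq j1 j2 c = eq_alt j1 j2 c := by
  set q := sol j1 j2 c with hq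
  -- the filtered candidate lists on both sides
  have hperm : (gridB.filter q).Perm (gridA.filter q) := gridB_perm.filter q
  -- Pre_eq produces a member of gridA.filter q
  obtain ⟨x, hx, y, hy, hxy⟩ := hpre
  have hmemA : (x, y) ∈ gridA.filter q := by
    rw [List.mem_filter]
    constructor
    · rw [gridA]; exact List.mem_flatMap.mpr ⟨x, hx, List.mem_map.mpr ⟨y, hy, rfl⟩⟩
    · simp [hq, sol, hxy]
  have hFne : gridA.filter q ≠ [] := List.ne_nil_of_mem hmemA
  -- A's pick
  cases hfm : fm (gridA.filter q) with
  | none => exact absurd ((fm_eq_none_iff _).mp hfm) hFne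
  | some m =>
    obtain ⟨hmF, hmin⟩ := fm_min _ (gridA_pairwise.sublist (List.filter_sublist)) m hfm
    -- B's pick
    cases hG : gridB.filter q with
    | nil =>
      exact absurd (hperm.symm.mem_iff.mp hmF) (by simp [hG])
    | cons m2 ts =>
      have hGpw : (gridB.filter q).Pairwise keyLt := gridB_pairwise.sublist (List.filter_sublist)
      rw [hG] at hGpw
      have hmin2 : ∀ r ∈ gridB.filter q, r = m2 ∨ keyLt m2 r := by
        intro r hr
        rw [hG] at hr
        rcases List.mem_cons.mp hr with rfl | hr
        · exact Or.inl rfl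
        · exact Or.inr ((List.pairwise_cons.mp hGpw).1 r hr)
      have hm2F : m2 ∈ gridA.filter q := hperm.mem_iff.mp (by simp [hG])
      have hmG : m ∈ gridB.filter q := hperm.symm.mem_iff.mp hmF
      have hmm2 : m = m2 := by
        rcases hmin2 m hmG with h1 | h1
        · exact h1
        · rcases hmin m2 hm2F with h2 | h2
          · exact h2.symm
          · exact (keyLt_asymm m m2 h2 h1).elim
      rw [eq_fm, eq_alt_grid, hfm, ← hq, hG, hmm2]
      rfl

-- ===== VERDICT (by name: the statement is the Claim_ definition above) =====
theorem eq_spec : Claim_equal_eq := by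
  intro j1 j2 c _ hpre
  unfold Spec_eq
  exact eq_eq_alt j1 j2 c hpre
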